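-- pv_equiv track=rewrite | github.com/liuyibo-leo/Data_Structures_and_Algorithms | Chapter 7 PekingU/OJ Test/插入与归并.py | check
-- ===== SOURCE A (Python) =====
-- def check(lst1,lst2):
--     flag = 0
--     for i in range(len(lst2)-1):
--         if lst2[i] > lst2[i+1]:
--             flag = i + 1
--             break
--     if lst1[flag:] == lst2[flag:]: # 插入排序
--         result = sorted(lst1[:flag+1])+lst2[flag+1:] # 再迭代一轮的结果
--         return True,result
--     else: # 归并排序
--         cnt = 2 # 归并的数量
--         result = lst2
--         while result == lst2: # 不断归并排序直到顺序发送变化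
--             sub_lst = [sorted(lst2[i:i+cnt]) for i in range(0,len(lst2),cnt)]
--             result = [num for sub in sub_lst for num in sub]
--             cnt *= 2
--         return False,result
-- ===== SOURCE B (Python) =====
-- def check(lst1, lst2):
--     n = len(lst2)
--     # positions p (1-based boundaries) where lst2[p-1] > lst2[p]
--     descents = [i + 1 for i in range(n - 1) if lst2[i] > lst2[i + 1]]
--     flag = descents[0] if descents else 0
--     if lst1[flag:] == lst2[flag:]:  # insertion sort stage
--         return True, sorted(lst1[:flag + 1]) + lst2[flag + 1:]
--     # merge sort stage: a width-cnt block pass changes lst2 iff some descent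
--     # position is not a multiple of cnt; find the first such power of two,
--     # then perform that single block-sorting pass.
--     cnt = 2
--     while all(d % cnt == 0 for d in descents):
--         cnt *= 2
--     out = []
--     for s in range(0, n, cnt):
--         out += sorted(lst2[s:s + cnt])
--     return False, out
-- ===== Notes on version B (the rewrite author's own statement) =====
-- stated objective: alternative
-- what changed: A's merge branch repeatedly rebuilds the whole block-sorted list and compares it to lst2 to find the pass width; B scans once for the descent positions, finds the width by a divisibility test on those positions, and builds the block-sorted pass exactly once (the insertion branch is shared).
import Mathlib
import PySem

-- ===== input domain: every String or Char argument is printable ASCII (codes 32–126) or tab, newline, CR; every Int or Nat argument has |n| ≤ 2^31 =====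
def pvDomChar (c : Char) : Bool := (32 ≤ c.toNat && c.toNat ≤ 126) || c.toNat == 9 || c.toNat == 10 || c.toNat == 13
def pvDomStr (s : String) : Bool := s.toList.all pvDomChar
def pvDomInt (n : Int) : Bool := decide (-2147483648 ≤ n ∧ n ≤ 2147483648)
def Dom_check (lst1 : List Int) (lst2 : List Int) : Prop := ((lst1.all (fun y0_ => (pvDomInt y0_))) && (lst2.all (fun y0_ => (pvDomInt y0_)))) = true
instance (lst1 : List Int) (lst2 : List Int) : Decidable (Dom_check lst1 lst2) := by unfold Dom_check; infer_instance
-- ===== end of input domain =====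

-- B replaces A's repeated build-a-pass-and-compare merge loop by one scan for the
-- descent positions plus a divisibility test to find the pass width, then a single
-- block-sorting pass (alternative decomposition; same return value on Pre_check).

-- ===== PORT A =====
-- 'for i in range(len(lst2)-1): if lst2[i] > lst2[i+1]: flag = i+1; break' — the
-- indices come from range(len-1), so they are in range and pyGetD … 0 is exact here.
def flagLoopA (lst2 : List Int) : List Int → Int
  | [] => 0
  | i :: rest =>
      if PySem.List.pyGetD lst2 i 0 > PySem.List.pyGetD lst2 (i + 1) 0 then i + 1
      else flagLoopA lst2 rest

-- result = [num for sub in [sorted(lst2[i:i+cnt]) for i in range(0,len(lst2),cnt)] for num in sub]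
def mergePassA (lst2 : List Int) (cnt : Int) : List Int :=
  ((PySem.List.pyRange 0 (lst2.length : Int) cnt).map
    (fun i => PySem.List.sorted (PySem.List.slice lst2 (some i) (some (i + cnt))) (fun v => v))).flatten

-- 'while result == lst2: …' — fuel-bounded: on Pre_check the loop exits within
-- lst2.length + 2 rounds (the fuel only totalizes the loop, it never changes a result).
def mergeLoopA (lst2 : List Int) : Nat → Int → List Int → List Int
  | 0, _, result => result
  | fuel + 1, cnt, result =>
      if result = lst2 then mergeLoopA lst2 fuel (cnt * 2) (mergePassA lst2 cnt)
      else result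

def check (lst1 : List Int) (lst2 : List Int) : Bool × List Int :=
  let flag := flagLoopA lst2 (PySem.List.pyRange 0 ((lst2.length : Int) - 1) 1)
  if PySem.List.slice lst1 (some flag) none = PySem.List.slice lst2 (some flag) none then
    (true, PySem.List.sorted (PySem.List.slice lst1 none (some (flag + 1))) (fun v => v)
            ++ PySem.List.slice lst2 (some (flag + 1)) none)
  else
    (false, mergeLoopA lst2 (lst2.length + 2) 2 lst2)

-- ===== PORT B =====
-- descents = [i + 1 for i in range(n - 1) if lst2[i] > lst2[i + 1]]  (indices in range: pyGetD … 0 exact)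
def descentsB (lst2 : List Int) : List Int :=
  ((PySem.List.pyRange 0 ((lst2.length : Int) - 1) 1).filter
    (fun i => PySem.List.pyGetD lst2 i 0 > PySem.List.pyGetD lst2 (i + 1) 0)).map (· + 1)

-- 'while all(d % cnt == 0 for d in descents): cnt *= 2' — same fuel bound as A's loop.
def cntLoopB (D : List Int) : Nat → Int → Int
  | 0, cnt => cnt
  | fuel + 1, cnt =>
      if D.all (fun d => PySem.Int.mod d cnt == 0) then cntLoopB D fuel (cnt * 2)
      else cnt

-- out = []; for s in range(0, n, cnt): out += sorted(lst2[s:s+cnt])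
def mergePassB (lst2 : List Int) (cnt : Int) : List Int :=
  (PySem.List.pyRange 0 (lst2.length : Int) cnt).foldl
    (fun out s => out ++ PySem.List.sorted (PySem.List.slice lst2 (some s) (some (s + cnt))) (fun v => v)) []

def check_alt (lst1 : List Int) (lst2 : List Int) : Bool × List Int :=
  let D := descentsB lst2
  let flag : Int := D.headD 0
  if PySem.List.slice lst1 (some flag) none = PySem.List.slice lst2 (some flag) none then
    (true, PySem.List.sorted (PySem.List.slice lst1 none (some (flag + 1))) (fun v => v)
            ++ PySem.List.slice lst2 (some (flag + 1)) none)
  else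
    (false, mergePassB lst2 (cntLoopB D (lst2.length + 2) 2))

-- ===== PRECONDITION & SPEC =====
-- Pre_check excludes exactly the inputs on which A never returns: if lst2 is already
-- sorted and lst1 ≠ lst2, A's 'while result == lst2' loop runs forever (B loops there too).
def Pre_check (lst1 : List Int) (lst2 : List Int) : Prop :=
  lst1 = lst2 ∨ ∃ i < lst2.length - 1, lst2.getD i 0 > lst2.getD (i + 1) 0

instance (lst1 : List Int) (lst2 : List Int) : Decidable (Pre_check lst1 lst2) := by
  unfold Pre_check; infer_instance

def pvWitness_check : List Int × List Int := ([2, 1, 4, 3], [1, 2, 4, 3])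

def Spec_check (lst1 : List Int) (lst2 : List Int) (out : Bool × List Int) : Prop := out = check_alt lst1 lst2
instance (lst1 : List Int) (lst2 : List Int) (out : Bool × List Int) : Decidable (Spec_check lst1 lst2 out) := by unfold Spec_check; infer_instance

-- ===== CLAIM (what is proved, stated in full; the proofs are below) =====
def Claim_equal_check : Prop := ∀ (lst1 : List Int) (lst2 : List Int), Dom_check lst1 lst2 → Pre_check lst1 lst2 → Spec_check lst1 lst2 (check lst1 lst2)

-- ===== LEMMAS AND PROOFS =====

-- proof-side chunked pass: sort each block of width c+1 and concatenate
def chunkPass (c : Nat) : List Int → List Int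
  | [] => []
  | x :: xs =>
      PySem.List.sorted ((x :: xs).take (c + 1)) (fun v => v) ++ chunkPass c (xs.drop c)
termination_by l => l.length
decreasing_by simp

-- every adjacent descent of l sits at a position divisible by m
def allDivNat (m : Nat) (l : List Int) : Prop :=
  ∀ i : Nat, (h : i + 1 < l.length) → l[i + 1] < l[i] → m ∣ (i + 1)

theorem sorted_id_fix_iff (l : List Int) :
    PySem.List.sorted l (fun v => v) = l ↔ l.Pairwise (· ≤ ·) := by
  constructor
  · intro h
    have := PySem.List.sorted_pairwise l (fun v => v)
    rw [h] at this
    exact this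
  · intro h
    exact PySem.List.sorted_eq_self_of_pairwise l (fun v => v) h

theorem pyRange_shift (s a b : Int) (hs : 0 < s) :
    PySem.List.pyRange a b s = (PySem.List.pyRange 0 (b - a) s).map (a + ·) := by
  rw [PySem.List.pyRange_of_pos _ _ hs, PySem.List.pyRange_of_pos _ _ hs, List.map_map]
  have h1 : (a < b) = (0 < b - a) := by simp
  simp only [zero_add, sub_zero, h1]
  apply List.map_congr_left
  intro k _
  simp

theorem pyRange_pos_nil (a b s : Int) (hs : 0 < s) (h : b ≤ a) :
    PySem.List.pyRange a b s = [] := by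
  rw [PySem.List.pyRange_of_pos _ _ hs]
  simp [show ¬ a < b by omega]

theorem pyRange_pos_cons (a b s : Int) (hs : 0 < s) (h : a < b) :
    PySem.List.pyRange a b s = a :: PySem.List.pyRange (a + s) b s := by
  rw [PySem.List.pyRange_of_pos _ _ hs, PySem.List.pyRange_of_pos _ _ hs]
  simp only [h, if_pos]
  have key : (b - a + s - 1) / s = (b - a - 1) / s + 1 := by
    have := Int.add_mul_ediv_right (b - a - 1) 1 (show s ≠ 0 by omega)
    rw [one_mul] at this
    rw [show b - a + s - 1 = b - a - 1 + s by ring, this]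
  have hnn : 0 ≤ (b - a - 1) / s := Int.ediv_nonneg (by omega) (by omega)
  rw [key]
  have htn : ((b - a - 1) / s + 1).toNat = ((b - a - 1) / s).toNat + 1 := by omega
  rw [htn, List.range_succ_eq_map, List.map_cons]
  congr 1
  · simp
  · rw [List.map_map]
    by_cases h2 : a + s < b
    · simp only [h2, if_pos]
      have h3 : (b - (a + s) + s - 1) / s = (b - a - 1) / s := by ring_nf
      rw [h3]
      apply List.map_congr_left
      intro k _
      simp [Nat.succ_eq_add_one]
      ring
    · simp only [h2]
      have h3 : (b - a - 1) / s = 0 := Int.ediv_eq_zero_of_lt (by omega) (by omega)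
      simp [h3]

theorem mergePassA_cons (l : List Int) (cnt : Int) (hc : 1 ≤ cnt) (hl : l ≠ []) :
    mergePassA l cnt =
      PySem.List.sorted (l.take cnt.toNat) (fun v => v) ++ mergePassA (l.drop cnt.toNat) cnt := by
  have hlen : 0 < l.length := List.length_pos_iff.mpr hl
  unfold mergePassA
  rw [pyRange_pos_cons 0 (l.length : Int) cnt (by omega) (by exact_mod_cast hlen)]
  rw [List.map_cons, List.flatten_cons]
  congr 1
  · rw [PySem.List.slice_toNat l (by omega) (by omega)]
    simp
  · rw [zero_add, pyRange_shift cnt cnt (l.length : Int) (by omega)]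
    rw [List.map_map]
    have hdl : ((l.drop cnt.toNat).length : Int) = (l.length : Int) - cnt ∨
        ((l.drop cnt.toNat).length : Int) = 0 ∧ (l.length : Int) - cnt ≤ 0 := by
      simp [List.length_drop]; omega
    have hr : PySem.List.pyRange 0 ((l.drop cnt.toNat).length : Int) cnt =
        PySem.List.pyRange 0 ((l.length : Int) - cnt) cnt := by
      rcases hdl with h | ⟨h1, h2⟩
      · rw [h]
      · rw [h1, pyRange_pos_nil _ _ _ (by omega) (by omega),
          pyRange_pos_nil _ _ _ (by omega) h2]
    rw [hr]
    apply congrArg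
    apply List.map_congr_left
    intro j hj
    have hj0 : 0 ≤ j := by
      rcases (PySem.List.mem_pyRange_iff_of_pos (by omega : (0:Int) < cnt) j).mp hj with ⟨h1, _⟩
      exact h1
    simp only [Function.comp_apply]
    rw [PySem.List.slice_toNat l (by omega) (by omega),
        PySem.List.slice_toNat (l.drop cnt.toNat) (by omega) (by omega),
        List.drop_drop]
    have e1 : (cnt + j + cnt).toNat - (cnt + j).toNat = (j + cnt).toNat - j.toNat := by omega
    have e3 : (cnt + j).toNat = j.toNat + cnt.toNat := by omega
    rw [e1, e3, Nat.add_comm j.toNat cnt.toNat]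

theorem mergePassA_eq_chunkPass (cnt : Int) (hc : 1 ≤ cnt) (l : List Int) :
    mergePassA l cnt = chunkPass (cnt.toNat - 1) l := by
  have H : ∀ n (l : List Int), l.length ≤ n → mergePassA l cnt = chunkPass (cnt.toNat - 1) l := by
    intro n
    induction n with
    | zero =>
      intro l hl
      have : l = [] := by cases l <;> simp_all
      subst this
      unfold mergePassA
      rw [show ((([] : List Int).length : Int) = 0) by simp]
      rw [pyRange_pos_nil 0 0 cnt (by omega) le_rfl]
      simp [chunkPass]
    | succ n ih =>
      intro l hl
      cases l with
      | nil =>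
        unfold mergePassA
        rw [show ((([] : List Int).length : Int) = 0) by simp]
        rw [pyRange_pos_nil 0 0 cnt (by omega) le_rfl]
        simp [chunkPass]
      | cons x xs =>
        obtain ⟨c, hc2⟩ : ∃ c, cnt.toNat = c + 1 := ⟨cnt.toNat - 1, by omega⟩
        rw [mergePassA_cons _ _ hc (by simp), chunkPass, hc2]
        simp only [Nat.add_sub_cancel, List.drop_succ_cons]
        congr 1
        have h5 := ih (xs.drop c) (by simp at hl ⊢; omega)
        rw [hc2, Nat.add_sub_cancel] at h5
        exact h5
  exact H l.length l le_rfl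

theorem allDivNat_decomp (c : Nat) (l : List Int) :
    (List.Pairwise (· ≤ ·) (l.take (c + 1)) ∧ allDivNat (c + 1) (l.drop (c + 1))) ↔
      allDivNat (c + 1) l := by
  constructor
  · rintro ⟨hp, hd⟩ i hi hdesc
    by_cases h1 : i < c
    · exfalso
      have hi' : i + 1 < (l.take (c + 1)).length := by simp [List.length_take]; omega
      have hle := (List.pairwise_iff_getElem.mp hp) i (i + 1) (by omega) hi' (by omega)
      simp only [List.getElem_take] at hle
      omega
    · by_cases h2 : i = c
      · subst h2; exact ⟨1, by omega⟩
      · have h3 : c + 1 ≤ i := by omega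
        have hj : (i - (c + 1)) + 1 < (l.drop (c + 1)).length := by
          simp [List.length_drop]; omega
        have hde : (l.drop (c + 1))[(i - (c + 1)) + 1] < (l.drop (c + 1))[i - (c + 1)] := by
          simp only [List.getElem_drop]
          have e1 : c + 1 + ((i - (c + 1)) + 1) = i + 1 := by omega
          have e2 : c + 1 + (i - (c + 1)) = i := by omega
          simp_rw [e1, e2]
          exact hdesc
        have hdiv := hd (i - (c + 1)) hj hde
        have e3 : i + 1 = (c + 1) + (i - (c + 1) + 1) := by omega
        rw [e3]
        exact (Nat.dvd_add_right dvd_rfl).mpr hdiv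
  · intro h
    constructor
    · rw [← List.isChain_iff_pairwise, List.isChain_iff_getElem]
      intro i hi
      have hb : i + 1 < c + 1 := by simp [List.length_take] at hi; omega
      have hlen : i + 1 < l.length := by simp [List.length_take] at hi; omega
      simp only [List.getElem_take]
      by_contra hlt
      push Not at hlt
      have hdiv := h i hlen hlt
      have := Nat.le_of_dvd (by omega) hdiv
      omega
    · intro j hj hdesc
      have hjl : (c + 1) + j + 1 < l.length := by simp [List.length_drop] at hj; omega
      have hde : l[(c + 1) + j + 1] < l[(c + 1) + j] := by
        simp only [List.getElem_drop] at hdesc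
        have e1 : c + 1 + (j + 1) = (c + 1) + j + 1 := by omega
        simp_rw [e1] at hdesc
        exact hdesc
      have hdiv := h ((c + 1) + j) hjl hde
      have e3 : (c + 1) + j + 1 = (c + 1) + (j + 1) := by omega
      rw [e3] at hdiv
      exact (Nat.dvd_add_right dvd_rfl).mp hdiv

theorem chunkPass_fix_iff (c : Nat) (l : List Int) :
    chunkPass c l = l ↔ allDivNat (c + 1) l := by
  have H : ∀ n (l : List Int), l.length ≤ n → (chunkPass c l = l ↔ allDivNat (c + 1) l) := by
    intro n
    induction n with
    | zero =>
      intro l hl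
      have : l = [] := by cases l <;> simp_all
      subst this
      simp [chunkPass, allDivNat]
    | succ n ih =>
      intro l hl
      cases l with
      | nil => simp [chunkPass, allDivNat]
      | cons x xs =>
        rw [chunkPass]
        have hds : xs.drop c = (x :: xs).drop (c + 1) := by simp
        have step1 : (PySem.List.sorted ((x :: xs).take (c + 1)) (fun v => v) ++ chunkPass c (xs.drop c) = x :: xs) ↔
            (PySem.List.sorted ((x :: xs).take (c + 1)) (fun v => v) = (x :: xs).take (c + 1) ∧
             chunkPass c (xs.drop c) = (x :: xs).drop (c + 1)) := by
          constructor
          · intro heq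
            have hsplit : x :: xs = (x :: xs).take (c + 1) ++ (x :: xs).drop (c + 1) :=
              (List.take_append_drop (c + 1) (x :: xs)).symm
            exact List.append_inj (heq.trans hsplit) (by rw [PySem.List.length_sorted])
          · rintro ⟨h1, h2⟩
            rw [h1, h2]
            exact List.take_append_drop (c + 1) (x :: xs)
        rw [step1, sorted_id_fix_iff, hds,
          ih ((x :: xs).drop (c + 1)) (by simp [List.length_drop] at *; omega)]
        exact allDivNat_decomp c (x :: xs)
  exact H l.length l le_rfl

theorem mod_zero_iff (d cnt : Int) (hc : 1 ≤ cnt) :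
    (PySem.Int.mod d cnt == 0) = true ↔ cnt ∣ d := by
  simp only [PySem.Int.mod, beq_iff_eq]
  rw [Int.fmod_eq_emod]
  simp only [show (0 ≤ cnt ∨ cnt ∣ d) ↔ True from iff_of_true (Or.inl (by omega)) trivial,
    if_true, add_zero]
  exact ⟨Int.dvd_of_emod_eq_zero, Int.emod_eq_zero_of_dvd⟩

theorem mem_descentsB (lst2 : List Int) (d : Int) :
    d ∈ descentsB lst2 ↔ ∃ k : Nat, ∃ h : k + 1 < lst2.length,
      lst2[k + 1]'h < lst2[k]'(by omega) ∧ d = (k : Int) + 1 := by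
  unfold descentsB
  rw [List.mem_map]
  constructor
  · rintro ⟨a, ha, rfl⟩
    rw [List.mem_filter] at ha
    obtain ⟨har, hap⟩ := ha
    rw [PySem.List.mem_pyRange_one] at har
    obtain ⟨h0, h1⟩ := har
    lift a to Nat using h0 with k
    refine ⟨k, by omega, ?_, by omega⟩
    rw [show ((k : Int) + 1) = (((k + 1 : Nat)) : Int) by push_cast; ring,
      PySem.List.pyGetD_natCast, PySem.List.pyGetD_natCast] at hap
    rw [List.getD_eq_getElem _ _ (by omega), List.getD_eq_getElem _ _ (by omega)] at hap
    simpa using hap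
  · rintro ⟨k, h, hdesc, rfl⟩
    refine ⟨(k : Int), ?_, rfl⟩
    rw [List.mem_filter, PySem.List.mem_pyRange_one]
    refine ⟨⟨by omega, by omega⟩, ?_⟩
    have e2 : (k : Int) + 1 = (((k + 1 : Nat)) : Int) := by omega
    rw [e2, PySem.List.pyGetD_natCast, PySem.List.pyGetD_natCast]
    rw [List.getD_eq_getElem _ _ (by omega), List.getD_eq_getElem _ _ (by omega)]
    simpa using hdesc

theorem allB_iff_allDivNat (lst2 : List Int) (cnt : Int) (hc : 1 ≤ cnt) :
    ((descentsB lst2).all (fun d => PySem.Int.mod d cnt == 0) = true) ↔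
      allDivNat cnt.toNat lst2 := by
  rw [List.all_eq_true]
  constructor
  · intro h i hi hdesc
    have hd : ((i : Int) + 1) ∈ descentsB lst2 := by
      rw [mem_descentsB]
      exact ⟨i, hi, hdesc, rfl⟩
    have hdv := (mod_zero_iff _ _ hc).mp (h _ hd)
    have hcc : cnt = ((cnt.toNat : Nat) : Int) := by omega
    rw [hcc, show ((i : Int) + 1) = (((i + 1 : Nat) : Int)) by push_cast; ring,
      Int.natCast_dvd_natCast] at hdv
    exact hdv
  · intro h d hd
    rw [mem_descentsB] at hd
    obtain ⟨k, hk, hdesc, rfl⟩ := hd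
    rw [mod_zero_iff _ _ hc]
    have hdv := h k hk hdesc
    have hcc : cnt = ((cnt.toNat : Nat) : Int) := by omega
    rw [hcc, show ((k : Int) + 1) = (((k + 1 : Nat) : Int)) by push_cast; ring,
      Int.natCast_dvd_natCast]
    exact hdv

theorem mergePassA_fix_iff (lst2 : List Int) (cnt : Int) (hc : 1 ≤ cnt) :
    mergePassA lst2 cnt = lst2 ↔
      (descentsB lst2).all (fun d => PySem.Int.mod d cnt == 0) = true := by
  rw [mergePassA_eq_chunkPass cnt hc, chunkPass_fix_iff,
    show cnt.toNat - 1 + 1 = cnt.toNat by omega, allB_iff_allDivNat lst2 cnt hc]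

theorem mergePassB_eq (lst2 : List Int) (cnt : Int) :
    mergePassB lst2 cnt = mergePassA lst2 cnt := by
  unfold mergePassB mergePassA
  rw [PySem.List.foldl_append_eq_flatMap, List.nil_append, List.flatMap_def]

theorem flagLoopA_eq (lst2 : List Int) (r : List Int) :
    flagLoopA lst2 r =
      ((r.filter (fun i => PySem.List.pyGetD lst2 i 0 > PySem.List.pyGetD lst2 (i + 1) 0)).map (· + 1)).headD 0 := by
  induction r with
  | nil => rfl
  | cons i rest ih =>
    rw [flagLoopA, List.filter_cons]
    by_cases h : (PySem.List.pyGetD lst2 i 0 > PySem.List.pyGetD lst2 (i + 1) 0)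
    · simp only [h, if_pos, decide_true]
      rfl
    · simp only [h, decide_false, if_false]
      exact ih

theorem mergeLoop_eq (lst2 : List Int) (f : Nat) (cnt : Int) (hc : 1 ≤ cnt)
    (hstop : ¬ ((descentsB lst2).all (fun d => PySem.Int.mod d (cnt * 2 ^ f) == 0) = true)) :
    mergeLoopA lst2 (f + 1) cnt lst2 =
      mergePassA lst2 (cntLoopB (descentsB lst2) (f + 1) cnt) := by
  induction f generalizing cnt with
  | zero =>
    rw [mergeLoopA, if_pos rfl, mergeLoopA, cntLoopB]
    rw [if_neg (by simpa using hstop)]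
  | succ g ih =>
    rw [mergeLoopA, if_pos rfl, cntLoopB]
    by_cases hall : (descentsB lst2).all (fun d => PySem.Int.mod d cnt == 0) = true
    · rw [if_pos hall]
      have hfix : mergePassA lst2 cnt = lst2 := (mergePassA_fix_iff lst2 cnt hc).mpr hall
      rw [hfix]
      exact ih (cnt * 2) (by omega) (by
        rw [show cnt * 2 * 2 ^ g = cnt * 2 ^ (g + 1) by ring]
        exact hstop)
    · rw [if_neg hall]
      have hfix : ¬ mergePassA lst2 cnt = lst2 := fun h => hall ((mergePassA_fix_iff lst2 cnt hc).mp h)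
      rw [mergeLoopA, if_neg hfix]

-- a descent of lst2 yields an element of descentsB not divisible by 2 * 2^(len+1)
theorem not_allB_top (lst2 : List Int)
    (hdes : ∃ i < lst2.length - 1, lst2.getD i 0 > lst2.getD (i + 1) 0) :
    ¬ ((descentsB lst2).all (fun d => PySem.Int.mod d (2 * 2 ^ (lst2.length + 1)) == 0) = true) := by
  obtain ⟨i, hi, hdesc⟩ := hdes
  intro hall
  have hlen : i + 1 < lst2.length := by omega
  have hdesc' : lst2[i + 1]'hlen < lst2[i]'(by omega) := by
    rw [List.getD_eq_getElem _ _ (by omega), List.getD_eq_getElem _ _ (by omega)] at hdesc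
    exact hdesc
  have hmem : ((i : Int) + 1) ∈ descentsB lst2 := by
    rw [mem_descentsB]
    exact ⟨i, hlen, hdesc', rfl⟩
  have h1 := List.all_eq_true.mp hall _ hmem
  have hcpos : (1 : Int) ≤ 2 * 2 ^ (lst2.length + 1) := by
    have := pow_pos (show (0:Int) < 2 by norm_num) (lst2.length + 1)
    omega
  have hdvd := (mod_zero_iff _ _ hcpos).mp h1
  have hle := Int.le_of_dvd (by omega) hdvd
  have hpow : (lst2.length : Nat) < 2 * 2 ^ (lst2.length + 1) := by
    have h2 := Nat.lt_two_pow_self (n := lst2.length)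
    have h3 : 2 ^ lst2.length ≤ 2 ^ (lst2.length + 1) :=
      Nat.pow_le_pow_right (by norm_num) (by omega)
    omega
  have hcast : ((2 * 2 ^ (lst2.length + 1) : Nat) : Int) = 2 * 2 ^ (lst2.length + 1) := by
    push_cast
    ring
  omega

-- ===== VERDICT (by name: the statement is the Claim_ definition above) =====
theorem check_spec : Claim_equal_check := by
  intro lst1 lst2 hdom hpre
  unfold Spec_check check check_alt
  rw [flagLoopA_eq,
    show ((PySem.List.pyRange 0 ((lst2.length : Int) - 1) 1).filter
        (fun i => PySem.List.pyGetD lst2 i 0 > PySem.List.pyGetD lst2 (i + 1) 0)).map (· + 1) =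
      descentsB lst2 from rfl]
  show (if PySem.List.slice lst1 (some ((descentsB lst2).headD 0)) none =
          PySem.List.slice lst2 (some ((descentsB lst2).headD 0)) none then _ else _) = _
  by_cases hcond : PySem.List.slice lst1 (some ((descentsB lst2).headD 0)) none =
      PySem.List.slice lst2 (some ((descentsB lst2).headD 0)) none
  · rw [if_pos hcond, if_pos hcond]
  · rw [if_neg hcond, if_neg hcond]
    have hdes : ∃ i < lst2.length - 1, lst2.getD i 0 > lst2.getD (i + 1) 0 := by
      rcases hpre with h | h
      · exact absurd (h ▸ rfl) hcond
      · exact h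
    have hstop := not_allB_top lst2 hdes
    rw [mergePassB_eq]
    rw [show lst2.length + 2 = (lst2.length + 1) + 1 from rfl]
    exact congrArg (Prod.mk false)
      (mergeLoop_eq lst2 (lst2.length + 1) 2 (by omega)
        (by rw [show (2 : Int) * 2 ^ (lst2.length + 1) = 2 * 2 ^ (lst2.length + 1) by ring]; exact hstop))
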